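-- pv_equiv track=rewrite | github.com/Stocarson/fear | sbox.py | isRelationTrue
-- ===== SOURCE A (Python) =====
-- sbox_input_bits = 16
--
-- sbox_output_bits = 8
--
-- def isRelationTrue(inbits, outbits, sboxinput, sboxoutput):
--     mask = 0
--     inputrelation = 0
--     outputrelation = 0
--     for i in range(sbox_input_bits):
--            mask = 1 << i
--            if inbits & mask != 0:
--                inputrelation ^= (sboxinput & mask) >> i
--     for i in range(sbox_output_bits):
--         mask = 1 << i
--         if outbits & mask != 0:
--             outputrelation ^= (sboxoutput & mask) >> i
--
--     if inputrelation == outputrelation: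
--         return 1
--     else:
--         return 0
-- ===== SOURCE B (Python) =====
-- sbox_input_bits = 16
--
-- sbox_output_bits = 8
--
-- def isRelationTrue(inbits, outbits, sboxinput, sboxoutput):
--     in_parity = (inbits & sboxinput & 0xFFFF).bit_count() & 1
--     out_parity = (outbits & sboxoutput & 0xFF).bit_count() & 1
--     return 1 if in_parity == out_parity else 0
-- ===== Notes on version B (the rewrite author's own statement) =====
-- stated objective: idiomatic
-- what changed: Replaces both bit-by-bit masked-XOR accumulation loops with closed-form popcount parities: parity = (x & y & mask).bit_count() & 1, masking to 16 and 8 bits to match the loop ranges.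
import Mathlib
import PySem

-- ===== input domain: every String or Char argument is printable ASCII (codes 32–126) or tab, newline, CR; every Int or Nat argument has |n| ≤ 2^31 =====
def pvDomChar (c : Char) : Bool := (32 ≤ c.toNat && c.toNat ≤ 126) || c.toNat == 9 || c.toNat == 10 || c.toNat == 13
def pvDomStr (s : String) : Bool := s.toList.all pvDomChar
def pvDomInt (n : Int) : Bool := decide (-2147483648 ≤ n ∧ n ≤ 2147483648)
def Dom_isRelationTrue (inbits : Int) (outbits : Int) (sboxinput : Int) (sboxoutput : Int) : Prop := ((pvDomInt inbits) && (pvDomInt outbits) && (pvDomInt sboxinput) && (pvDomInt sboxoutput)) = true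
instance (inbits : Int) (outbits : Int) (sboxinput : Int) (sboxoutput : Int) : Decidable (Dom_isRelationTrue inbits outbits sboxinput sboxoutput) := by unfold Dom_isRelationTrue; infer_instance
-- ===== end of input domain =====

-- B replaces A's two bit-by-bit masked-XOR loops with closed-form popcount parities
-- ((x & y & mask).bit_count() & 1) — a more idiomatic closed form.

-- ===== PORT A =====
def pvSboxInputBits : Int := 16
def pvSboxOutputBits : Int := 8

-- the shared shape of A's two loops: for i in range(nbits): mask = 1 << i; if bits & mask != 0: rel ^= (src & mask) >> i
def pvRelLoop (bits : Int) (src : Int) (nbits : Int) : Int :=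
  (PySem.List.pyRange 0 nbits 1).foldl
    (fun (acc : Int) (i : Int) =>
      let mask : Int := (1 : Int) <<< i.toNat
      if PySem.Int.band bits mask ≠ 0 then PySem.Int.bxor acc ((PySem.Int.band src mask) >>> i.toNat)
      else acc) 0

def isRelationTrue (inbits : Int) (outbits : Int) (sboxinput : Int) (sboxoutput : Int) : Int :=
  let inputrelation := pvRelLoop inbits sboxinput pvSboxInputBits
  let outputrelation := pvRelLoop outbits sboxoutput pvSboxOutputBits
  if inputrelation = outputrelation then 1 else 0

-- ===== PORT B =====
-- (x & y & mask).bit_count() & 1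
def pvMaskedParity (x : Int) (y : Int) (mask : Int) : Int :=
  PySem.Int.band ((PySem.Int.bitCount (PySem.Int.band (PySem.Int.band x y) mask) : Int)) 1

def isRelationTrue_alt (inbits : Int) (outbits : Int) (sboxinput : Int) (sboxoutput : Int) : Int :=
  let inParity := pvMaskedParity inbits sboxinput 0xFFFF
  let outParity := pvMaskedParity outbits sboxoutput 0xFF
  if inParity = outParity then 1 else 0

-- ===== PRECONDITION & SPEC =====
def Spec_isRelationTrue (inbits : Int) (outbits : Int) (sboxinput : Int) (sboxoutput : Int) (out : Int) : Prop := out = isRelationTrue_alt inbits outbits sboxinput sboxoutput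
instance (inbits : Int) (outbits : Int) (sboxinput : Int) (sboxoutput : Int) (out : Int) : Decidable (Spec_isRelationTrue inbits outbits sboxinput sboxoutput out) := by unfold Spec_isRelationTrue; infer_instance

-- ===== CLAIM (what is proved, stated in full; the proofs are below) =====
def Claim_equal_isRelationTrue : Prop := ∀ (inbits : Int) (outbits : Int) (sboxinput : Int) (sboxoutput : Int), Dom_isRelationTrue inbits outbits sboxinput sboxoutput → Spec_isRelationTrue inbits outbits sboxinput sboxoutput (isRelationTrue inbits outbits sboxinput sboxoutput)

-- ===== LEMMAS AND PROOFS =====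

-- Python's bit i of an arbitrary (two's-complement) integer.
def pvPBit (a : Int) (i : Nat) : Bool :=
  if 0 ≤ a then a.toNat.testBit i else !((-a - 1).toNat.testBit i)

-- number of indices i < n with bit i set in both a and b
def pvCnt (a : Int) (b : Int) : Nat → Nat
  | 0 => 0
  | n + 1 => pvCnt a b n + (if pvPBit a n && pvPBit b n then 1 else 0)

theorem pv_mod_two_toNat (n : Nat) : n % 2 = (n.testBit 0).toNat := by
  rw [Nat.testBit_zero]
  rcases Nat.mod_two_eq_zero_or_one n with h | h <;> simp [h]

theorem pv_and_mod_two (A C : Nat) : (A &&& C) % 2 = A % 2 * (C % 2) := by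
  rw [pv_mod_two_toNat, pv_mod_two_toNat A, pv_mod_two_toNat C, Nat.testBit_and]
  cases A.testBit 0 <;> cases C.testBit 0 <;> simp

theorem pv_and_div_two (A C : Nat) : (A &&& C) / 2 = A / 2 &&& C / 2 := by
  apply Nat.eq_of_testBit_eq
  intro i
  rw [Nat.testBit_div_two, Nat.testBit_and, Nat.testBit_and, Nat.testBit_div_two,
    Nat.testBit_div_two]

theorem pv_testBit_div_mod (i : Nat) : ∀ A : Nat, A.testBit i = decide (A / 2 ^ i % 2 = 1) := by
  induction i with
  | zero => intro A; simp [Nat.testBit_zero]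
  | succ i ih =>
    intro A
    rw [← Nat.testBit_div_two, ih, Nat.div_div_eq_div_mul,
      show (2 : Nat) * 2 ^ i = 2 ^ (i + 1) by ring]

theorem pv_sub_and_testBit (i : Nat) : ∀ (A C : Nat),
    (A - (A &&& C)).testBit i = (A.testBit i && !(C.testBit i)) := by
  induction i with
  | zero =>
    intro A C
    have hle : A &&& C ≤ A := Nat.and_le_left
    have hm := pv_and_mod_two A C
    simp only [Nat.testBit_zero]
    have hiff : ((A - (A &&& C)) % 2 = 1) ↔ ((A % 2 = 1) ∧ ¬ (C % 2 = 1)) := by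
      rcases Nat.mod_two_eq_zero_or_one A with hA | hA <;>
        rcases Nat.mod_two_eq_zero_or_one C with hC | hC <;>
        rw [hA, hC] at hm <;> omega
    have h2 : (decide ((A - (A &&& C)) % 2 = 1) : Bool)
        = decide ((A % 2 = 1) ∧ ¬ (C % 2 = 1)) := decide_eq_decide.mpr hiff
    rw [h2]
    simp
    rcases Nat.mod_two_eq_zero_or_one C with hC | hC <;> simp [hC]
  | succ i ih =>
    intro A C
    have hle : A &&& C ≤ A := Nat.and_le_left
    have hm := pv_and_mod_two A C
    have hdiv : (A - (A &&& C)) / 2 = A / 2 - (A / 2 &&& C / 2) := by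
      rw [← pv_and_div_two]
      rcases Nat.mod_two_eq_zero_or_one A with hA | hA <;>
        rcases Nat.mod_two_eq_zero_or_one C with hC | hC <;>
        rw [hA, hC] at hm <;> omega
    rw [← Nat.testBit_div_two, hdiv, ih, Nat.testBit_div_two, Nat.testBit_div_two]

theorem pv_shiftLeft_eq (i : Nat) : ((1 : Int) <<< i) = ((2 ^ i : Nat) : Int) := by
  rw [Int.shiftLeft_eq]
  push_cast
  ring

theorem pv_mask_cast (m : Nat) : ((2 ^ m : Nat) : Int) - 1 = ((2 ^ m - 1 : Nat) : Int) := by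
  have : 1 ≤ 2 ^ m := Nat.one_le_two_pow
  push_cast [this]
  ring

theorem pv_band_cast (x : Int) (hx : 0 ≤ x) (M : Nat) :
    PySem.Int.band x ((M : Nat) : Int) = ((x.toNat &&& M : Nat) : Int) := by
  rw [PySem.Int.band_of_nonneg hx (by positivity), Int.toNat_natCast]

theorem pv_band_neg (x : Int) (hx : ¬ 0 ≤ x) (M : Nat) :
    PySem.Int.band x ((M : Nat) : Int) = ((M - (M &&& (-x - 1).toNat) : Nat) : Int) := by
  simp only [PySem.Int.band, if_neg hx, Int.natCast_nonneg, if_true, Int.toNat_natCast]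

theorem pv_mask_and (m C : Nat) : (2 ^ m - 1) &&& C = C % 2 ^ m := by
  rw [Nat.and_comm, Nat.and_two_pow_sub_one_eq_mod]

-- band with a power-of-two mask picks out one Python bit
theorem pv_band_two_pow (x : Int) (i : Nat) :
    PySem.Int.band x ((1 : Int) <<< i) = if pvPBit x i then ((2 ^ i : Nat) : Int) else 0 := by
  rw [pv_shiftLeft_eq]
  by_cases hx : 0 ≤ x
  · rw [pv_band_cast x hx, Nat.and_two_pow]
    simp only [pvPBit, if_pos hx]
    cases x.toNat.testBit i <;> simp
  · rw [pv_band_neg x hx, Nat.and_comm, Nat.and_two_pow]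
    simp only [pvPBit, if_neg hx]
    cases (-x - 1).toNat.testBit i <;> simp

theorem pv_band_shift (x : Int) (i : Nat) :
    (PySem.Int.band x ((1 : Int) <<< i)) >>> i = if pvPBit x i then 1 else 0 := by
  rw [pv_band_two_pow]
  cases h : pvPBit x i
  · simp only [Bool.false_eq_true, if_false]
    have h0 : ((0 : Int) >>> i) = (((0 >>> i : Nat)) : Int) := rfl
    rw [h0, Nat.zero_shiftRight]
    rfl
  · simp only [if_true]
    have h1 : (((2 ^ i : Nat) : Int) >>> i) = (((2 ^ i >>> i : Nat)) : Int) := rfl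
    rw [h1, Nat.shiftRight_eq_div_pow, Nat.div_self (by positivity)]
    rfl

theorem pv_band_ne_zero (x : Int) (i : Nat) :
    (PySem.Int.band x ((1 : Int) <<< i) ≠ 0) ↔ pvPBit x i = true := by
  rw [pv_band_two_pow]
  cases pvPBit x i <;> simp

-- the Python bit of a conjunction is the conjunction of the bits
theorem pv_pbit_band (a b : Int) (i : Nat) :
    pvPBit (PySem.Int.band a b) i = (pvPBit a i && pvPBit b i) := by
  by_cases ha : 0 ≤ a <;> by_cases hb : 0 ≤ b
  · rw [PySem.Int.band_of_nonneg ha hb]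
    simp [pvPBit, ha, hb, Nat.testBit_and]
  · simp only [PySem.Int.band, if_pos ha, if_neg hb]
    simp [pvPBit, ha, hb, pv_sub_and_testBit]
  · simp only [PySem.Int.band, if_neg ha, if_pos hb]
    simp [pvPBit, ha, hb, pv_sub_and_testBit, Bool.and_comm]
  · simp only [PySem.Int.band, if_neg ha, if_neg hb]
    have h1 : ¬ (0 ≤ -((((-a - 1).toNat ||| (-b - 1).toNat) : Nat) : Int) - 1) := by
      have : (0:Int) ≤ (((-a - 1).toNat ||| (-b - 1).toNat : Nat) : Int) := by positivity
      omega
    simp only [pvPBit, if_neg h1, if_neg ha, if_neg hb]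
    have h2 : -(-((((-a - 1).toNat ||| (-b - 1).toNat) : Nat) : Int) - 1) - 1
        = (((-a - 1).toNat ||| (-b - 1).toNat : Nat) : Int) := by ring
    rw [h2, Int.toNat_natCast, Nat.testBit_or]
    cases (-a - 1).toNat.testBit i <;> cases (-b - 1).toNat.testBit i <;> simp

-- the low-bits mask splits off its top bit additively
theorem pv_band_mask_succ (x : Int) (n : Nat) :
    PySem.Int.band x (((1 : Int) <<< (n + 1)) - 1)
      = PySem.Int.band x (((1 : Int) <<< n) - 1) + PySem.Int.band x ((1 : Int) <<< n) := by
  rw [pv_band_two_pow, pv_shiftLeft_eq, pv_shiftLeft_eq, pv_mask_cast, pv_mask_cast]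
  have e1 : (2 : Nat) ^ (n + 1) = 2 ^ n * 2 := pow_succ 2 n
  have hp : 0 < (2 : Nat) ^ n := by positivity
  by_cases hx : 0 ≤ x
  · rw [pv_band_cast x hx, pv_band_cast x hx, Nat.and_two_pow_sub_one_eq_mod,
      Nat.and_two_pow_sub_one_eq_mod]
    have hpb : pvPBit x n = decide (x.toNat / 2 ^ n % 2 = 1) := by
      rw [pvPBit, if_pos hx, pv_testBit_div_mod]
    have hmm : x.toNat % 2 ^ (n + 1) = x.toNat % 2 ^ n + 2 ^ n * (x.toNat / 2 ^ n % 2) := by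
      rw [pow_succ, Nat.mod_mul]
    rcases Nat.mod_two_eq_zero_or_one (x.toNat / 2 ^ n) with h | h
    · have hf : pvPBit x n = false := by rw [hpb, h]; rfl
      rw [h] at hmm
      simp only [hf, Bool.false_eq_true, if_false, add_zero]
      exact_mod_cast (by omega : x.toNat % 2 ^ (n + 1) = x.toNat % 2 ^ n)
    · have ht : pvPBit x n = true := by rw [hpb, h]; rfl
      rw [h] at hmm
      rw [ht, if_pos rfl]
      exact_mod_cast (by omega : x.toNat % 2 ^ (n + 1) = x.toNat % 2 ^ n + 2 ^ n)
  · rw [pv_band_neg x hx, pv_band_neg x hx, pv_mask_and, pv_mask_and]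
    set C := (-x - 1).toNat with hC
    have hpb : pvPBit x n = !(decide (C / 2 ^ n % 2 = 1)) := by
      rw [pvPBit, if_neg hx, pv_testBit_div_mod]
    have hmm : C % 2 ^ (n + 1) = C % 2 ^ n + 2 ^ n * (C / 2 ^ n % 2) := by
      rw [pow_succ, Nat.mod_mul]
    have hlt : C % 2 ^ n < 2 ^ n := Nat.mod_lt _ hp
    rcases Nat.mod_two_eq_zero_or_one (C / 2 ^ n) with h | h
    · have ht : pvPBit x n = true := by rw [hpb, h]; rfl
      rw [h] at hmm
      rw [ht, if_pos rfl]
      have hNat : 2 ^ (n + 1) - 1 - C % 2 ^ (n + 1)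
          = (2 ^ n - 1 - C % 2 ^ n) + 2 ^ n := by omega
      rw [hNat]
      push_cast
      ring
    · have hf : pvPBit x n = false := by rw [hpb, h]; rfl
      rw [h] at hmm
      simp only [hf, Bool.false_eq_true, if_false, add_zero]
      have hNat : 2 ^ (n + 1) - 1 - C % 2 ^ (n + 1) = 2 ^ n - 1 - C % 2 ^ n := by omega
      rw [hNat]

theorem pv_bitCount_pow (n : Nat) : PySem.Int.bitCount ((2 ^ n : Nat) : Int) = 1 := by
  induction n with
  | zero => decide
  | succ n ih =>
    rw [PySem.Int.bitCount_natCast (by positivity)]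
    have h2 : 2 ^ (n + 1) % 2 = 0 := by
      simp [pow_succ]
    have h3 : 2 ^ (n + 1) / 2 = 2 ^ n := by
      rw [pow_succ]
      exact Nat.mul_div_cancel _ (by norm_num)
    rw [h2, h3, ih]

theorem pv_bitCount_add_pow (n : Nat) : ∀ u : Nat, u < 2 ^ n →
    PySem.Int.bitCount ((u + 2 ^ n : Nat) : Int) = PySem.Int.bitCount ((u : Nat) : Int) + 1 := by
  induction n with
  | zero =>
    intro u hu
    interval_cases u
    decide
  | succ n ih =>
    intro u hu
    rcases Nat.eq_zero_or_pos u with rfl | hupos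
    · simpa using pv_bitCount_pow (n + 1)
    · have e1 : (2 : Nat) ^ (n + 1) = 2 * 2 ^ n := by ring
      rw [PySem.Int.bitCount_natCast (by positivity), PySem.Int.bitCount_natCast hupos]
      have hm2 : (u + 2 ^ (n + 1)) % 2 = u % 2 := by omega
      have hd2 : (u + 2 ^ (n + 1)) / 2 = u / 2 + 2 ^ n := by omega
      have hlt : u / 2 < 2 ^ n := by omega
      rw [hm2, hd2, ih _ hlt]
      ring

-- each band-with-low-mask value is a Nat below the mask bound
theorem pv_band_mask_range (x : Int) (n : Nat) :
    ∃ u : Nat, PySem.Int.band x (((1 : Int) <<< n) - 1) = (u : Int) ∧ u < 2 ^ n := by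
  rw [pv_shiftLeft_eq, pv_mask_cast]
  have hp : 0 < (2 : Nat) ^ n := by positivity
  by_cases hx : 0 ≤ x
  · exact ⟨x.toNat &&& (2 ^ n - 1), pv_band_cast x hx _,
      lt_of_le_of_lt Nat.and_le_right (by omega)⟩
  · exact ⟨(2 ^ n - 1) - ((2 ^ n - 1) &&& (-x - 1).toNat), pv_band_neg x hx _, by omega⟩

-- B's masked popcount counts exactly the common set bits below n
theorem pv_bitCount_band_mask (a b : Int) (n : Nat) :
    PySem.Int.bitCount (PySem.Int.band (PySem.Int.band a b) (((1 : Int) <<< n) - 1))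
      = pvCnt a b n := by
  induction n with
  | zero =>
    rw [show ((1 : Int) <<< (0 : Nat)) - 1 = 0 from by decide,
      PySem.Int.band_zero, PySem.Int.bitCount_zero]
    rfl
  | succ n ih =>
    obtain ⟨u, hu, hub⟩ := pv_band_mask_range (PySem.Int.band a b) n
    rw [hu] at ih
    rw [pv_band_mask_succ, pv_band_two_pow, pv_pbit_band, hu]
    cases h : (pvPBit a n && pvPBit b n)
    · norm_num
      rw [ih]
      simp [pvCnt, h]
    · norm_num
      rw [show ((u : Int) + (2 ^ n : Int)) = ((u + 2 ^ n : Nat) : Int) by push_cast; ring]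
      rw [pv_bitCount_add_pow n u hub, ih]
      simp [pvCnt, h]

-- B's parity expression
theorem pv_maskedParity_eq (a b : Int) (n : Nat) :
    pvMaskedParity a b (((1 : Int) <<< n) - 1) = ((pvCnt a b n : Nat) : Int) % 2 := by
  unfold pvMaskedParity
  rw [pv_bitCount_band_mask, PySem.Int.band_one]
  show Int.fmod _ 2 = _
  rw [Int.fmod_eq_emod]
  norm_num

-- A's loop computes the same parity
theorem pv_foldl_eq (a b : Int) (n : Nat) :
    List.foldl
      (fun (acc : Int) (i : Int) =>
        if PySem.Int.band a ((1 : Int) <<< i.toNat) ≠ 0 then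
          PySem.Int.bxor acc ((PySem.Int.band b ((1 : Int) <<< i.toNat)) >>> i.toNat)
        else acc) 0 (PySem.List.pyRange 0 (n : Int) 1)
      = ((pvCnt a b n : Nat) : Int) % 2 := by
  induction n with
  | zero =>
    simp [PySem.List.pyRange, pvCnt]
  | succ n ih =>
    have hsplit : PySem.List.pyRange 0 ((n : Int) + 1) 1
        = PySem.List.pyRange 0 (n : Int) 1 ++ PySem.List.pyRange (n : Int) ((n : Int) + 1) 1 :=
      PySem.List.pyRange_one_append 0 (n : Int) ((n : Int) + 1) (by positivity) (by omega)
    have hlast : PySem.List.pyRange (n : Int) ((n : Int) + 1) 1 = [(n : Int)] := by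
      rw [PySem.List.pyRange_one_cons (by omega)]
      congr 1
      unfold PySem.List.pyRange
      norm_num
    push_cast
    rw [hsplit, hlast, List.foldl_append, ih]
    simp only [List.foldl_cons, List.foldl_nil, Int.toNat_natCast]
    rw [show pvCnt a b (n + 1) = pvCnt a b n + (if pvPBit a n && pvPBit b n then 1 else 0) from rfl]
    cases ha : pvPBit a n
    · rw [if_neg (by rw [pv_band_ne_zero]; simp [ha])]
      simp
    · rw [if_pos (by rw [pv_band_ne_zero, ha]), pv_band_shift]
      cases hb : pvPBit b n
      · simp
      · norm_num
        have h01 : ((pvCnt a b n : Nat) : Int) % 2 = 0 ∨ ((pvCnt a b n : Nat) : Int) % 2 = 1 := by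
          omega
        rcases h01 with h | h
        · rw [h, show PySem.Int.bxor 0 1 = 1 from by decide]
          omega
        · rw [h, show PySem.Int.bxor 1 1 = 0 from by decide]
          omega

theorem pv_relLoop_eq (a b : Int) (n : Nat) :
    pvRelLoop a b (n : Int) = ((pvCnt a b n : Nat) : Int) % 2 := by
  simp only [pvRelLoop]
  exact pv_foldl_eq a b n

-- ===== VERDICT (by name: the statement is the Claim_ definition above) =====
theorem isRelationTrue_spec : Claim_equal_isRelationTrue := by
  intro inbits outbits sboxinput sboxoutput _
  show isRelationTrue inbits outbits sboxinput sboxoutput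
      = isRelationTrue_alt inbits outbits sboxinput sboxoutput
  unfold isRelationTrue isRelationTrue_alt
  have h16 : pvSboxInputBits = ((16 : Nat) : Int) := rfl
  have h8 : pvSboxOutputBits = ((8 : Nat) : Int) := rfl
  have hin : (0xFFFF : Int) = ((1 : Int) <<< (16 : Nat)) - 1 := by decide
  have hout : (0xFF : Int) = ((1 : Int) <<< (8 : Nat)) - 1 := by decide
  rw [h16, h8, pv_relLoop_eq, pv_relLoop_eq, hin, hout, pv_maskedParity_eq, pv_maskedParity_eq]
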